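-- pv_equiv track=rewrite | github.com/adamcy99/Study | CodeSignal Study/Practice8.py | solution
-- ===== SOURCE A (Python) =====
-- def solution(s):
--
--     def checkPalindrome(s):
--         l = 0
--         r = len(s)-1
--         while l < r:
--             if s[l] != s[r]:
--                 return False
--             l += 1
--             r -= 1
--         return True
--
--     def cutPrefix(s):
--         longestPrefix = ""
--         for i in range(len(s)-1,-1,-1):
--             if checkPalindrome(s[:i+1]):
--                 longestPrefix = s[:i+1]
--                 if len(longestPrefix) > 1:
--                     return s[i+1:]
--                 else:
--                     return s
--
--     curOut = s
--     while cutPrefix(curOut) != curOut: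
--         if not curOut:
--             break
--         curOut = cutPrefix(curOut)
--
--     return curOut if curOut else ""
-- ===== SOURCE B (Python) =====
-- def solution(s):
--     # O(n^2): one descending DP pass computes, for every start index i, the end of the
--     # longest palindrome s[i..j] with j > i (or i if none); then the stripping phase is
--     # a simple chain of jumps through that table.
--     n = len(s)
--     prev = [False] * n          # prev[j] = is s[i+1..j] a palindrome (row i+1)
--     best = []                   # best[i] = largest j > i with s[i..j] palindrome, else i
--     for i in range(n - 1, -1, -1):
--         cur = [s[i] == s[j] and (j - i < 2 or prev[j - 1]) for j in range(n)]
--         b = n - 1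
--         while b > i and not cur[b]:
--             b -= 1
--         best = [b] + best
--         prev = cur
--     start = 0
--     while start < n and best[start] > start:
--         start = best[start] + 1
--     return s[start:]
-- ===== Notes on version B (the rewrite author's own statement) =====
-- stated objective: alternative
-- what changed: A rescans the current suffix at every stripping step (for each candidate prefix a fresh two-pointer palindrome check on a sliced copy); B makes one descending DP pass over the original string computing for every index the end of the longest palindrome starting there, after which the repeated stripping is just a chain of jumps through that table.
import Mathlib
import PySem

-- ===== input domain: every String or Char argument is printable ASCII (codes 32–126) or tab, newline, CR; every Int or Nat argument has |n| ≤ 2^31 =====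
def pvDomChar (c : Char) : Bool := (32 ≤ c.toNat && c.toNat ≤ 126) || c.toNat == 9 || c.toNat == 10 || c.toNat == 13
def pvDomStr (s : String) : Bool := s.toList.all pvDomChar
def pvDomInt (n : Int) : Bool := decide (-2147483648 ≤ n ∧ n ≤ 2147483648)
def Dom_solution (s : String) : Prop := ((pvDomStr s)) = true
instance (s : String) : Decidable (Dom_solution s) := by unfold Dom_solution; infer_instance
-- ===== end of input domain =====

-- B replaces A's repeated rescans (two-pointer palindrome check of every prefix at every
-- stripping step) by one descending DP pass building a longest-palindrome-end table, after
-- which the stripping loop is a chain of table jumps; equivalence of return values is proved.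
-- (Loops are ported with structural fuel counters; every fuel supplied strictly exceeds the
-- number of iterations the Python loop can make, so the 0-fuel branches are unreachable.)

-- ===== PORT A =====
-- checkPalindrome's while loop: two Int pointers moving inward; s[l], s[r] via pyGet?
-- (always in range here, so comparing the fetched Options equals Python's char comparison)
def checkPalLoop (t : List Char) (fuel : Nat) (l r : Int) : Bool :=
  match fuel with
  | 0 => true
  | fuel + 1 =>
    if l < r then
      if PySem.List.pyGet? t l ≠ PySem.List.pyGet? t r then false
      else checkPalLoop t fuel (l + 1) (r - 1)
    else true

-- cutPrefix's 'for i in range(len(s)-1,-1,-1)' with its early returns; none = fell through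
-- (only for empty s); s[:i+1] = take, s[i+1:] = drop (i ≥ 0 here, so this is exact)
def cutLoopA (t : List Char) (fuel : Nat) (i : Int) : Option (List Char) :=
  match fuel with
  | 0 => none
  | fuel + 1 =>
    if 0 ≤ i then
      if checkPalLoop (t.take (i + 1).toNat) ((t.take (i + 1).toNat).length + 1) 0
          (((t.take (i + 1).toNat).length : Int) - 1) then
        if (t.take (i + 1).toNat).length > 1 then some (t.drop (i + 1).toNat)
        else some t
      else cutLoopA t fuel (i - 1)
    else none

def cutPrefixA (t : List Char) : Option (List Char) :=
  cutLoopA t (t.length + 1) ((t.length : Int) - 1)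

-- the outer 'while cutPrefix(curOut) != curOut' loop (each pass strips ≥ 2 chars or stops)
def loopA (fuel : Nat) (cur : List Char) : List Char :=
  match fuel with
  | 0 => cur
  | fuel + 1 =>
    if cutPrefixA cur ≠ some cur then
      if cur = [] then cur                               -- 'if not curOut: break'
      else
        match cutPrefixA cur with
        | some t => loopA fuel t                         -- curOut = cutPrefix(curOut)
        | none => cur                                    -- unreachable for nonempty cur
    else cur

def solution (s : String) : String :=
  let r := loopA (s.toList.length + 1) s.toList
  if r = [] then "" else String.mk r                     -- 'curOut if curOut else ""'

-- ===== PORT B =====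
-- Source B's row comprehension: cur = [s[i] == s[j] and (j - i < 2 or prev[j-1]) for j in range(n)]
-- ('j - i < 2' is written 'j < i + 2': equal over ℤ, safe under Nat subtraction)
def rowB (cs : List Char) (n i : Nat) (prev : List Bool) : List Bool :=
  (List.range n).map (fun j =>
    (cs.getD i ' ' == cs.getD j ' ') && (decide (j < i + 2) || prev.getD (j - 1) false))

-- Source B's inner 'while b > i and not cur[b]: b -= 1', structurally on b
def findDesc (cur : List Bool) (i b : Nat) : Nat :=
  match b with
  | 0 => 0
  | b + 1 =>
    if i < b + 1 ∧ ¬ cur.getD (b + 1) false then findDesc cur i b else b + 1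

-- Source B's 'for i in range(n-1,-1,-1)' building (best, prev): recursion on the count m of rows
-- already built, so the iteration for i = n - m runs after those for n-m+1 .. n-1, exactly as
-- the descending loop does
def buildB (cs : List Char) (n m : Nat) : List Nat × List Bool :=
  match m with
  | 0 => ([], List.replicate n false)
  | m + 1 =>
    (findDesc (rowB cs n (n - (m + 1)) (buildB cs n m).2) (n - (m + 1)) (n - 1)
        :: (buildB cs n m).1,
     rowB cs n (n - (m + 1)) (buildB cs n m).2)

-- Source B's 'while start < n and best[start] > start' jump chain (start grows ≥ 2 each pass)
def chase (best : List Nat) (n fuel start : Nat) : Nat :=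
  match fuel with
  | 0 => start
  | fuel + 1 =>
    if start < n ∧ best.getD start 0 > start then chase best n fuel (best.getD start 0 + 1)
    else start

def solution_alt (s : String) : String :=
  let cs := s.toList
  let n := cs.length
  let best := (buildB cs n n).1
  String.mk (cs.drop (chase best n (n + 1) 0))           -- s[start:]

-- ===== PRECONDITION & SPEC =====
def Spec_solution (s : String) (out : String) : Prop := out = solution_alt s
instance (s : String) (out : String) : Decidable (Spec_solution s out) := by unfold Spec_solution; infer_instance

-- ===== CLAIM (what is proved, stated in full; the proofs are below) =====
def Claim_equal_solution : Prop := ∀ (s : String), Dom_solution s → Spec_solution s (solution s)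

-- ===== LEMMAS AND PROOFS =====

-- reference predicate: s[i..j] is a palindrome (standard inward recursion)
def palRec (t : List Char) (i j : Nat) : Bool :=
  if j < i + 2 then t.getD i ' ' == t.getD j ' '
  else (t.getD i ' ' == t.getD j ' ') && palRec t (i + 1) (j - 1)
termination_by j - i
decreasing_by omega

-- generic descending scan, the common shape of A's prefix search and B's findDesc
def scanD (p : Nat → Bool) (i b : Nat) : Nat :=
  if _h : i < b ∧ ¬ p b then scanD p i (b - 1) else b
termination_by b
decreasing_by omega

theorem getD_take' (t : List Char) (m k : Nat) (d : Char) (h : k < m) :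
    (t.take m).getD k d = t.getD k d := by
  simp [List.getD_eq_getElem?_getD, h]

theorem getD_drop' (t : List Char) (s k : Nat) (d : Char) :
    (t.drop s).getD k d = t.getD (s + k) d := by
  simp [List.getD_eq_getElem?_getD, List.getElem?_drop]

theorem pyGet?_eq_getD (t : List Char) (k : Nat) (h : k < t.length) :
    PySem.List.pyGet? t (k : Int) = some (t.getD k ' ') := by
  rw [PySem.List.pyGet?_natCast, List.getElem?_eq_getElem h]
  simp [List.getD_eq_getElem?_getD, List.getElem?_eq_getElem h]

theorem palRec_self (t : List Char) (i : Nat) : palRec t i i = true := by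
  unfold palRec; simp

theorem checkPalLoop_ge (t : List Char) (fuel : Nat) (l r : Int) (h : r ≤ l) :
    checkPalLoop t fuel l r = true := by
  cases fuel with
  | zero => rfl
  | succ f => rw [checkPalLoop, if_neg (by omega)]

theorem checkPalLoop_step (t : List Char) (fuel : Nat) (i j : Nat) (hi : i < t.length)
    (hj : j < t.length) (hij : i < j) :
    checkPalLoop t (fuel + 1) (i : Int) (j : Int) =
      (if t.getD i ' ' ≠ t.getD j ' ' then false
       else checkPalLoop t fuel ((i : Int) + 1) ((j : Int) - 1)) := by
  rw [checkPalLoop, if_pos (by exact_mod_cast hij), pyGet?_eq_getD t i hi,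
    pyGet?_eq_getD t j hj]
  simp

theorem checkPal_eq (t : List Char) : ∀ (fuel i j : Nat), i ≤ j → j < t.length →
    j - i ≤ 2 * fuel → checkPalLoop t fuel (i : Int) (j : Int) = palRec t i j := by
  intro fuel
  induction fuel with
  | zero =>
    intro i j hij hj hd
    have hji : j = i := by omega
    subst hji
    rw [checkPalLoop_ge t 0 _ _ (by omega)]
    exact (palRec_self t j).symm
  | succ fuel ih =>
    intro i j hij hj hd
    rcases Nat.eq_or_lt_of_le hij with hji | hlt
    · subst hji
      rw [checkPalLoop_ge t _ _ _ (by omega)]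
      exact (palRec_self t i).symm
    · by_cases h2 : j < i + 2
      · have hji : j = i + 1 := by omega
        subst hji
        rw [checkPalLoop_step t fuel i (i + 1) (by omega) hj (by omega)]
        rw [checkPalLoop_ge t fuel _ _ (by push_cast; omega)]
        rw [palRec, if_pos h2]
        rw [Bool.eq_iff_iff]; simp
      · rw [checkPalLoop_step t fuel i j (by omega) hj (by omega)]
        have c1 : ((i : Int) + 1) = (((i + 1 : Nat)) : Int) := by push_cast; ring
        have c2 : ((j : Int) - 1) = (((j - 1 : Nat)) : Int) := by omega
        rw [c1, c2, ih (i + 1) (j - 1) (by omega) (by omega) (by omega)]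
        conv_rhs => rw [palRec]
        rw [if_neg h2]
        rw [Bool.eq_iff_iff]; simp

theorem palRec_take (t : List Char) : ∀ (i j m : Nat), i ≤ j → j < m →
    palRec (t.take m) i j = palRec t i j := by
  have aux : ∀ (d i j m : Nat), j - i ≤ d → i ≤ j → j < m →
      palRec (t.take m) i j = palRec t i j := by
    intro d
    induction d with
    | zero =>
      intro i j m hd hij hm
      have hji : j = i := by omega
      subst hji
      conv_lhs => rw [palRec]
      conv_rhs => rw [palRec]
      rw [if_pos (by omega), if_pos (by omega)]
      rw [getD_take' t m j ' ' hm]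
    | succ d ih =>
      intro i j m hd hij hm
      by_cases h2 : j < i + 2
      · conv_lhs => rw [palRec]
        conv_rhs => rw [palRec]
        rw [if_pos h2, if_pos h2, getD_take' t m i ' ' (by omega),
          getD_take' t m j ' ' hm]
      · conv_lhs => rw [palRec]
        conv_rhs => rw [palRec]
        rw [if_neg h2, if_neg h2, getD_take' t m i ' ' (by omega),
          getD_take' t m j ' ' hm, ih (i + 1) (j - 1) m (by omega) (by omega) (by omega)]
  exact fun i j m => aux (j - i) i j m le_rfl

theorem palRec_drop (t : List Char) (s : Nat) : ∀ (i j : Nat),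
    palRec (t.drop s) i j = palRec t (s + i) (s + j) := by
  have aux : ∀ (d i j : Nat), j - i ≤ d →
      palRec (t.drop s) i j = palRec t (s + i) (s + j) := by
    intro d
    induction d with
    | zero =>
      intro i j hd
      conv_lhs => rw [palRec]
      conv_rhs => rw [palRec]
      by_cases h2 : j < i + 2
      · rw [if_pos h2, if_pos (by omega), getD_drop', getD_drop']
      · omega
    | succ d ih =>
      intro i j hd
      conv_lhs => rw [palRec]
      conv_rhs => rw [palRec]
      by_cases h2 : j < i + 2
      · rw [if_pos h2, if_pos (by omega), getD_drop', getD_drop']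
      · rw [if_neg h2, if_neg (by omega), getD_drop', getD_drop',
          ih (i + 1) (j - 1) (by omega)]
        have e1 : s + (i + 1) = s + i + 1 := by omega
        have e2 : s + (j - 1) = s + j - 1 := by omega
        rw [e1, e2]
  exact fun i j => aux (j - i) i j le_rfl

theorem scanD_ge (p : Nat → Bool) : ∀ (i b : Nat), i ≤ b → i ≤ scanD p i b := by
  intro i b
  fun_induction scanD p i b with
  | case1 b h ih => intro _; exact ih (by omega)
  | case2 b h => intro hb; exact hb

theorem scanD_le (p : Nat → Bool) : ∀ (i b : Nat), scanD p i b ≤ b := by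
  intro i b
  fun_induction scanD p i b with
  | case1 b h ih => omega
  | case2 b h => omega

theorem scanD_congr (p q : Nat → Bool) : ∀ (i b : Nat),
    (∀ k, i < k → k ≤ b → p k = q k) → scanD p i b = scanD q i b := by
  intro i b
  fun_induction scanD p i b with
  | case1 b h ih =>
    intro hpq
    have h' : i < b ∧ ¬ q b = true := ⟨h.1, by rw [← hpq b h.1 le_rfl]; exact h.2⟩
    conv_rhs => rw [scanD]
    rw [dif_pos h']
    exact ih (fun k hk1 hk2 => hpq k hk1 (by omega))
  | case2 b h =>
    intro hpq
    conv_rhs => rw [scanD]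
    rw [dif_neg]
    intro ⟨h1, h2⟩
    exact h ⟨h1, by rw [hpq b h1 le_rfl]; exact h2⟩

theorem scanD_shift (q : Nat → Bool) (s : Nat) : ∀ (i b : Nat),
    scanD (fun k => q (s + k)) i b + s = scanD q (s + i) (s + b) := by
  intro i b
  fun_induction scanD (fun k => q (s + k)) i b with
  | case1 b h ih =>
    conv_rhs => rw [scanD]
    rw [dif_pos (show s + i < s + b ∧ ¬ q (s + b) = true from ⟨by omega, h.2⟩)]
    have hsb : s + (b - 1) = s + b - 1 := by omega
    rw [← hsb]
    exact ih
  | case2 b h =>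
    conv_rhs => rw [scanD]
    rw [dif_neg]
    · omega
    · intro ⟨h1, h2⟩
      exact h ⟨by omega, h2⟩

theorem findDesc_eq_scanD (cur : List Bool) : ∀ (i b : Nat),
    findDesc cur i b = scanD (fun k => cur.getD k false) i b := by
  intro i b
  induction b with
  | zero =>
    conv_rhs => rw [scanD]
    rw [dif_neg (by omega)]
    rfl
  | succ b ihb =>
    rw [findDesc]
    conv_rhs => rw [scanD]
    by_cases hc : i < b + 1 ∧ ¬ cur.getD (b + 1) false = true
    · rw [if_pos hc, dif_pos hc]
      simpa using ihb
    · rw [if_neg hc, dif_neg hc]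

theorem cutLoopA_eq (u : List Char) : ∀ (fuel i : Nat), i < u.length → i < fuel →
    cutLoopA u fuel (i : Int) =
      (if 0 < scanD (fun k => palRec u 0 k) 0 i
       then some (u.drop (scanD (fun k => palRec u 0 k) 0 i + 1))
       else some u) := by
  intro fuel
  induction fuel with
  | zero => intro i _ hf; omega
  | succ fuel IH =>
    intro i hi _
    rw [cutLoopA]
    rw [if_pos (by omega : (0 : Int) ≤ (i : Int))]
    have htn : ((i : Int) + 1).toNat = i + 1 := by omega
    rw [htn]
    have hlen : (u.take (i + 1)).length = i + 1 := by
      simp [List.length_take]; omega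
    rw [hlen]
    have hcast : ((i + 1 : Nat) : Int) - 1 = ((i : Nat) : Int) := by push_cast; ring
    rw [hcast]
    have hck := checkPal_eq (u.take (i + 1)) (i + 1 + 1) 0 i (by omega)
      (by rw [hlen]; omega) (by omega)
    norm_cast at hck
    rw [hck, palRec_take u 0 i (i + 1) (by omega) (by omega)]
    by_cases hp : palRec u 0 i = true
    · rw [if_pos hp]
      conv_rhs => rw [scanD]
      rw [dif_neg (by intro ⟨_, h2⟩; exact h2 hp)]
      by_cases h0 : 0 < i
      · rw [if_pos (by omega), if_pos h0]
      · rw [if_neg (by omega), if_neg h0]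
    · rw [if_neg hp]
      have h0 : 0 < i := by
        rcases Nat.eq_zero_or_pos i with h | h
        · subst h; exact absurd (palRec_self u 0) hp
        · exact h
      have hcast2 : ((i : Nat) : Int) - 1 = (((i - 1 : Nat)) : Int) := by omega
      rw [hcast2, IH (i - 1) (by omega) (by omega)]
      conv_rhs => rw [scanD]
      rw [dif_pos ⟨h0, fun h => hp h⟩]

theorem rowB_spec (cs : List Char) (n i : Nat) (prev : List Bool)
    (hprev : ∀ j, i + 1 ≤ j → j < n → prev.getD j false = palRec cs (i + 1) j) :
    ∀ j, i ≤ j → j < n → (rowB cs n i prev).getD j false = palRec cs i j := by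
  intro j hij hj
  have : (rowB cs n i prev).getD j false =
      ((cs.getD i ' ' == cs.getD j ' ') && (decide (j < i + 2) || prev.getD (j - 1) false)) := by
    rw [rowB, List.getD_eq_getElem?_getD, List.getElem?_map, List.getElem?_range hj]
    rfl
  rw [this]
  by_cases h2 : j < i + 2
  · rw [palRec, if_pos h2]
    simp [h2]
  · rw [palRec, if_neg h2]
    rw [hprev (j - 1) (by omega) (by omega)]
    simp [h2]

theorem buildB_spec (cs : List Char) (n : Nat) : ∀ (m : Nat), m ≤ n →
    ((buildB cs n m).1.length = m) ∧
    (∀ k, n - m ≤ k → k < n →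
      (buildB cs n m).1.getD (k - (n - m)) 0 = scanD (fun j => palRec cs k j) k (n - 1)) ∧
    (∀ j, n - m ≤ j → j < n → (buildB cs n m).2.getD j false = palRec cs (n - m) j) := by
  intro m
  induction m with
  | zero =>
    intro _
    refine ⟨rfl, ?_, ?_⟩
    · intro k hik hk; omega
    · intro j hij hj; omega
  | succ m ihm =>
    intro hm
    obtain ⟨ih1, ih2, ih3⟩ := ihm (by omega)
    have hi1 : n - m = (n - (m + 1)) + 1 := by omega
    rw [hi1] at ih2 ih3
    have hrow : ∀ j, n - (m + 1) ≤ j → j < n →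
        (rowB cs n (n - (m + 1)) (buildB cs n m).2).getD j false = palRec cs (n - (m + 1)) j :=
      rowB_spec cs n (n - (m + 1)) (buildB cs n m).2 ih3
    refine ⟨by rw [buildB]; simp [ih1], ?_, by rw [buildB]; exact hrow⟩
    intro k hik hk
    rw [buildB]
    rcases Nat.eq_or_lt_of_le hik with hke | hkgt
    · rw [← hke]
      simp only [Nat.sub_self, List.getD_cons_zero]
      rw [findDesc_eq_scanD]
      exact scanD_congr _ _ (n - (m + 1)) (n - 1)
        (fun k' hk1 hk2 => hrow k' (by omega) (by omega))
    · have hsk : k - (n - (m + 1)) = (k - ((n - (m + 1)) + 1)) + 1 := by omega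
      rw [hsk, List.getD_cons_succ]
      exact ih2 k (by omega) hk
  
theorem drop_ne_of_len (cs : List Char) (a b : Nat) (h : a < b) (hb : b ≤ cs.length) :
    cs.drop b ≠ cs.drop a := by
  intro heq
  have := congrArg List.length heq
  simp [List.length_drop] at this
  omega

theorem loopA_succ (fuel : Nat) (cur : List Char) :
    loopA (fuel + 1) cur =
      (if cutPrefixA cur ≠ some cur then
        (if cur = [] then cur
         else match cutPrefixA cur with
           | some t => loopA fuel t
           | none => cur)
       else cur) := rfl

theorem main_loop (cs : List Char) : ∀ (f start : Nat), start ≤ cs.length →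
    loopA f (cs.drop start) =
      cs.drop (chase (buildB cs cs.length cs.length).1 cs.length f start) := by
  intro f
  induction f with
  | zero => intro start _; rfl
  | succ f ih =>
    intro start hstart
    by_cases hs : start < cs.length
    · -- current suffix nonempty
      have hulen : (cs.drop start).length = cs.length - start := List.length_drop
      have hL1 : 1 ≤ (cs.drop start).length := by omega
      -- characterise A's cutPrefix on the suffix in terms of B's table entry
      have hb := (buildB_spec cs cs.length cs.length le_rfl).2.1 start (by omega) hs
      simp only [Nat.sub_self, Nat.sub_zero] at hb
      set b := scanD (fun j => palRec cs start j) start (cs.length - 1) with hbdef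
      set sc := scanD (fun k => palRec (cs.drop start) 0 k) 0 ((cs.drop start).length - 1)
        with hscdef
      have hscan : sc + start = b := by
        rw [hscdef,
          scanD_congr (fun k => palRec (cs.drop start) 0 k)
            (fun k => palRec cs (start + 0) (start + k)) 0 ((cs.drop start).length - 1)
            (fun k _ _ => palRec_drop cs start 0 k),
          scanD_shift (fun j => palRec cs (start + 0) j) start 0 ((cs.drop start).length - 1)]
        simp only [Nat.add_zero]
        rw [show start + ((cs.drop start).length - 1) = cs.length - 1 from by omega]
      have hbge : start ≤ b := scanD_ge _ _ _ (by omega)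
      have hble : b ≤ cs.length - 1 := scanD_le _ _ _
      have hcut : cutPrefixA (cs.drop start) =
          (if 0 < sc then some ((cs.drop start).drop (sc + 1)) else some (cs.drop start)) := by
        rw [cutPrefixA,
          show ((cs.drop start).length : Int) - 1 = (((cs.drop start).length - 1 : Nat) : Int)
            from by omega,
          cutLoopA_eq (cs.drop start) ((cs.drop start).length + 1) ((cs.drop start).length - 1)
            (by omega) (by omega)]
      have hune : cs.drop start ≠ [] := List.ne_nil_of_length_pos (by omega)
      by_cases hb0 : 0 < sc
      · -- A strips s[:b-start+1] from the suffix; B jumps start to best[start]+1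
        have hdd : (cs.drop start).drop (sc + 1) = cs.drop (b + 1) := by
          rw [List.drop_drop]
          congr 1
          omega
        rw [loopA_succ, hcut, if_pos hb0, hdd]
        rw [if_pos (by
          simp only [ne_eq, Option.some.injEq]
          exact drop_ne_of_len cs start (b + 1) (by omega) (by omega))]
        rw [if_neg hune]
        show loopA f (cs.drop (b + 1)) = _
        rw [ih (b + 1) (by omega)]
        conv_rhs => rw [chase]
        rw [if_pos (show start < cs.length ∧
              (buildB cs cs.length cs.length).1.getD start 0 > start from ⟨hs, by rw [hb]; omega⟩)]
        rw [hb]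
      · -- no palindromic prefix of length ≥ 2: both sides stop
        rw [loopA_succ, hcut, if_neg hb0]
        rw [if_neg (by simp)]
        conv_rhs => rw [chase]
        rw [if_neg (by
          intro ⟨_, hgt⟩
          rw [hb] at hgt
          omega)]
    · -- start = length : suffix empty, both sides stop
      have hu : cs.drop start = [] := List.drop_eq_nil_of_le (by omega)
      rw [hu]
      have hcp : cutPrefixA ([] : List Char) = none := by
        rw [cutPrefixA]
        simp only [List.length_nil]
        rw [cutLoopA, if_neg (by norm_num)]
      conv_rhs => rw [chase]
      rw [if_neg (by intro ⟨h1, _⟩; omega)]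
      rw [hu]
      simp [loopA, hcp]

-- ===== VERDICT (by name: the statement is the Claim_ definition above) =====
theorem solution_spec : Claim_equal_solution := by
  intro s _
  unfold Spec_solution solution solution_alt
  have h := main_loop s.toList (s.toList.length + 1) 0 (by omega)
  simp only [List.drop_zero] at h
  rw [h]
  by_cases hr :
      List.drop (chase (buildB s.toList s.toList.length s.toList.length).1 s.toList.length (s.toList.length + 1) 0) s.toList = []
  · simp only [hr, if_pos]; rfl
  · simp only [hr, if_false]
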